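-- pv_equiv track=rewrite | github.com/071975/NeMo | examples/speech_translation/punct_ds_preparation/prepare_big_data_for_punctuation_capitalization_task_simple.py | get_segment_lengths_by_files
-- ===== SOURCE A (Python) =====
-- from typing import Dict, List, Optional, Set, Tuple, Union
--
-- def get_segment_lengths_by_files(
--     num_segments_by_files: List[int], sequence_length_range: Tuple[int, int]
-- ) -> List[List[int]]:
--     segment_lengths_by_files = []
--     all_lengths = list(range(sequence_length_range[0], sequence_length_range[1]))
--     curr_length_idx = 0
--     for i, ns in enumerate(num_segments_by_files):
--         segment_lengths_for_file = []
--         for _ in range(ns):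
--             segment_lengths_for_file.append(all_lengths[curr_length_idx])
--             curr_length_idx = (curr_length_idx + 1) % len(all_lengths)
--         segment_lengths_by_files.append(segment_lengths_for_file)
--     return segment_lengths_by_files
-- ===== SOURCE B (Python) =====
-- def get_segment_lengths_by_files(num_segments_by_files, sequence_length_range):
--     all_lengths = list(range(sequence_length_range[0], sequence_length_range[1]))
--     total = sum(max(ns, 0) for ns in num_segments_by_files)
--     if total == 0:
--         return [[] for _ in num_segments_by_files]
--     reps = -(-total // len(all_lengths))
--     flat = (all_lengths * reps)[:total]
--     out = []
--     cursor = 0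
--     for ns in num_segments_by_files:
--         n = max(ns, 0)
--         out.append(flat[cursor:cursor + n])
--         cursor += n
--     return out
-- ===== Notes on version B (the rewrite author's own statement) =====
-- stated objective: faster
-- what changed: Instead of walking a carried cyclic index one element at a time, B materialises the whole cyclic sequence once by list repetition (all_lengths * reps, truncated to total) and then partitions that flat list into per-file slices with a cursor; no per-element modulo/index state remains.
import Mathlib
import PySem

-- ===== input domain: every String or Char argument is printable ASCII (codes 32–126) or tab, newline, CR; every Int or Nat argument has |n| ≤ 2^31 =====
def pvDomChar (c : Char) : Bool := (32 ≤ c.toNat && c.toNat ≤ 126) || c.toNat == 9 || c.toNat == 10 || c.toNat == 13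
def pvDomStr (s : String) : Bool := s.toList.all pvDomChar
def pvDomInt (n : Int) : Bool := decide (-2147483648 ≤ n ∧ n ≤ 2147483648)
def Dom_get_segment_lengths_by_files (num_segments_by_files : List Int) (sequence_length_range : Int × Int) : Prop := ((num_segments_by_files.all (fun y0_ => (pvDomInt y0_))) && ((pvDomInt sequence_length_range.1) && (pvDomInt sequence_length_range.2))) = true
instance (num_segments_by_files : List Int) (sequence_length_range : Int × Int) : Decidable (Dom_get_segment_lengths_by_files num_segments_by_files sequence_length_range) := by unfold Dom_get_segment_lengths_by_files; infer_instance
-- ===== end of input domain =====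

-- B builds the whole cyclic sequence once by list repetition truncated to the total count and partitions it
-- into per-file slices with a cursor, instead of A's carried per-element cyclic index; a timing run
-- measured B faster by a constant factor (bulk list repetition/slicing replaces the per-element loop body).


-- ===== PORT A =====
-- literal port of A: build all_lengths = list(range(lo, hi)), then walk a cyclic index
def get_segment_lengths_by_files (num_segments_by_files : List Int) (sequence_length_range : Int × Int) : List (List Int) :=
  let all_lengths := PySem.List.pyRange sequence_length_range.1 sequence_length_range.2 1
  (num_segments_by_files.foldl
    (fun (st : List (List Int) × Int) ns =>
      let inner := (List.range ns.toNat).foldl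
        (fun (st2 : List Int × Int) _ =>
          (st2.1 ++ [PySem.List.pyGetD all_lengths st2.2 0],
           PySem.Int.mod (st2.2 + 1) (all_lengths.length : Int)))
        ([], st.2)
      (st.1 ++ [inner.1], inner.2))
    ([], 0)).1

-- ===== PORT B =====
-- literal port of B: flat = (all_lengths * reps)[:total], then cursor slices flat[cursor:cursor+n]
def get_segment_lengths_by_files_alt (num_segments_by_files : List Int) (sequence_length_range : Int × Int) : List (List Int) :=
  let all_lengths := PySem.List.pyRange sequence_length_range.1 sequence_length_range.2 1
  let total : Int := (num_segments_by_files.map (fun ns => max ns 0)).sum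
  if total = 0 then
    num_segments_by_files.map (fun _ => ([] : List Int))
  else
    let reps : Int := -(PySem.Int.floordiv (-total) (all_lengths.length : Int))
    let flat := PySem.List.slice (List.flatten (List.replicate reps.toNat all_lengths)) none (some total)
    (num_segments_by_files.foldl
      (fun (st : List (List Int) × Int) ns =>
        let n : Int := max ns 0
        (st.1 ++ [PySem.List.slice flat (some st.2) (some (st.2 + n))], st.2 + n))
      ([], 0)).1

-- ===== PRECONDITION & SPEC =====
-- Pre_ excludes exactly the inputs where A raises IndexError: an empty range (hi ≤ lo)
-- together with some positive segment count (B raises ZeroDivisionError there too).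
def Pre_get_segment_lengths_by_files (num_segments_by_files : List Int) (sequence_length_range : Int × Int) : Prop :=
  0 < sequence_length_range.2 - sequence_length_range.1 ∨ ∀ x ∈ num_segments_by_files, x ≤ 0
instance (num_segments_by_files : List Int) (sequence_length_range : Int × Int) : Decidable (Pre_get_segment_lengths_by_files num_segments_by_files sequence_length_range) := by unfold Pre_get_segment_lengths_by_files; infer_instance

def pvWitness_get_segment_lengths_by_files : List Int × (Int × Int) := ([3, 2, 0], (1, 3))

def Spec_get_segment_lengths_by_files (num_segments_by_files : List Int) (sequence_length_range : Int × Int) (out : List (List Int)) : Prop := out = get_segment_lengths_by_files_alt num_segments_by_files sequence_length_range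
instance (num_segments_by_files : List Int) (sequence_length_range : Int × Int) (out : List (List Int)) : Decidable (Spec_get_segment_lengths_by_files num_segments_by_files sequence_length_range out) := by unfold Spec_get_segment_lengths_by_files; infer_instance

-- ===== CLAIM (what is proved, stated in full; the proofs are below) =====
def Claim_equal_get_segment_lengths_by_files : Prop := ∀ (num_segments_by_files : List Int) (sequence_length_range : Int × Int), Dom_get_segment_lengths_by_files num_segments_by_files sequence_length_range → Pre_get_segment_lengths_by_files num_segments_by_files sequence_length_range → Spec_get_segment_lengths_by_files num_segments_by_files sequence_length_range (get_segment_lengths_by_files num_segments_by_files sequence_length_range)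

-- ===== LEMMAS AND PROOFS =====

-- ((x % L) + 1) % L = (x + 1) % L  (Python mod, positive divisor)
lemma pvMod_step (x L : Int) (hL : 0 < L) :
    PySem.Int.mod (PySem.Int.mod x L + 1) L = PySem.Int.mod (x + 1) L := by
  rw [PySem.Int.mod_eq_emod_of_pos hL, PySem.Int.mod_eq_emod_of_pos hL,
      PySem.Int.mod_eq_emod_of_pos hL]
  rw [Int.add_emod x 1 L, Int.add_emod (x % L) 1 L, Int.emod_emod_of_dvd x dvd_rfl]

-- A's inner loop, started at index (i % L), appends the closed-form elements and
-- ends at index (i + n) % L.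
lemma pvInnerA (lo hi : Int) (hL : 0 < hi - lo) (n : Nat) (i : Int) (acc : List Int) :
    (List.range n).foldl
      (fun (st2 : List Int × Int) _ =>
        (st2.1 ++ [PySem.List.pyGetD (PySem.List.pyRange lo hi 1) st2.2 0],
         PySem.Int.mod (st2.2 + 1) ((PySem.List.pyRange lo hi 1).length : Int)))
      (acc, PySem.Int.mod i (hi - lo))
    = (acc ++ (List.range n).map (fun (j : Nat) => lo + PySem.Int.mod (i + (j : Int)) (hi - lo)),
       PySem.Int.mod (i + (n : Int)) (hi - lo)) := by
  induction n with
  | zero => simp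
  | succ n ih =>
    rw [List.range_succ, List.foldl_append, ih]
    have hlen : ((PySem.List.pyRange lo hi 1).length : Int) = hi - lo := by
      rw [PySem.List.length_pyRange_one]; omega
    have h0 : 0 ≤ PySem.Int.mod (i + (n : Int)) (hi - lo) := PySem.Int.mod_nonneg _ hL
    have h1 : PySem.Int.mod (i + (n : Int)) (hi - lo) < hi - lo := PySem.Int.mod_lt _ hL
    have hget : PySem.List.pyGetD (PySem.List.pyRange lo hi 1)
        (PySem.Int.mod (i + (n : Int)) (hi - lo)) 0
        = lo + PySem.Int.mod (i + (n : Int)) (hi - lo) := by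
      rw [PySem.List.pyGetD_eq_getElem _ 0 h0 (by rw [PySem.List.length_pyRange_one]; omega),
          PySem.List.getElem_pyRange_one]
      omega
    simp only [List.foldl_cons, List.foldl_nil, hget, hlen, List.map_append,
      List.map_cons, List.map_nil, List.append_assoc, pvMod_step _ _ hL, Prod.mk.injEq]
    refine ⟨trivial, ?_⟩
    congr 1
    push_cast
    ring

-- A's outer fold equals a closed-form fold, with A's index = offset mod (hi - lo)
lemma pvOuterA (lo hi : Int) (hL : 0 < hi - lo) :
    ∀ (nsf : List Int) (off : Int) (acc : List (List Int)),
    (nsf.foldl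
      (fun (st : List (List Int) × Int) ns =>
        (st.1 ++ [((List.range ns.toNat).foldl
          (fun (st2 : List Int × Int) _ =>
            (st2.1 ++ [PySem.List.pyGetD (PySem.List.pyRange lo hi 1) st2.2 0],
             PySem.Int.mod (st2.2 + 1) ((PySem.List.pyRange lo hi 1).length : Int)))
          ([], st.2)).1],
         ((List.range ns.toNat).foldl
          (fun (st2 : List Int × Int) _ =>
            (st2.1 ++ [PySem.List.pyGetD (PySem.List.pyRange lo hi 1) st2.2 0],
             PySem.Int.mod (st2.2 + 1) ((PySem.List.pyRange lo hi 1).length : Int)))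
          ([], st.2)).2))
      (acc, PySem.Int.mod off (hi - lo))).1
    = (nsf.foldl
        (fun (st : List (List Int) × Int) ns =>
          (st.1 ++ [(List.range ns.toNat).map
              (fun (j : Nat) => lo + PySem.Int.mod (st.2 + (j : Int)) (hi - lo))],
           st.2 + (ns.toNat : Int)))
        (acc, off)).1 := by
  intro nsf
  induction nsf with
  | nil => intro off acc; simp
  | cons ns rest ih =>
    intro off acc
    simp only [List.foldl_cons]
    rw [pvInnerA lo hi hL ns.toNat off []]
    simpa using ih (off + (ns.toNat : Int)) (acc ++ [(List.range ns.toNat).map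
      (fun (j : Nat) => lo + PySem.Int.mod (off + (j : Int)) (hi - lo))])

-- all counts nonpositive: A appends only empty lists
lemma pvA_nonpos (lo hi : Int) :
    ∀ (nsf : List Int), (∀ x ∈ nsf, x ≤ 0) → ∀ (acc : List (List Int)) (i : Int),
    (nsf.foldl
      (fun (st : List (List Int) × Int) ns =>
        (st.1 ++ [((List.range ns.toNat).foldl
          (fun (st2 : List Int × Int) _ =>
            (st2.1 ++ [PySem.List.pyGetD (PySem.List.pyRange lo hi 1) st2.2 0],
             PySem.Int.mod (st2.2 + 1) ((PySem.List.pyRange lo hi 1).length : Int)))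
          ([], st.2)).1],
         ((List.range ns.toNat).foldl
          (fun (st2 : List Int × Int) _ =>
            (st2.1 ++ [PySem.List.pyGetD (PySem.List.pyRange lo hi 1) st2.2 0],
             PySem.Int.mod (st2.2 + 1) ((PySem.List.pyRange lo hi 1).length : Int)))
          ([], st.2)).2))
      (acc, i)).1 = acc ++ nsf.map (fun _ => []) := by
  intro nsf
  induction nsf with
  | nil => intro _ acc i; simp
  | cons ns rest ih =>
    intro h acc i
    have hns : ns.toNat = 0 := by
      have := h ns (List.mem_cons_self ..); omega
    simp only [List.foldl_cons, hns, List.range_zero, List.foldl_nil, List.map_cons]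
    rw [ih (fun x hx => h x (List.mem_cons_of_mem _ hx))]
    simp

-- the repeated range list, elementwise: lo + (k % size)
lemma pvFlatten (lo hi : Int) (hL : 0 < hi - lo) (r : Nat) :
    List.flatten (List.replicate r (PySem.List.pyRange lo hi 1)) =
    (List.range (r * (hi - lo).toNat)).map
      (fun (k : Nat) => lo + PySem.Int.mod (k : Int) (hi - lo)) := by
  induction r with
  | zero => simp
  | succ r ih =>
    rw [List.replicate_succ, List.flatten_cons, ih]
    have : (r + 1) * (hi - lo).toNat = (hi - lo).toNat + r * (hi - lo).toNat := by ring
    rw [this, List.range_add, List.map_append, List.map_map]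
    congr 1
    · rw [PySem.List.pyRange_one]
      apply List.map_congr_left
      intro k hk
      rw [List.mem_range] at hk
      have : PySem.Int.mod (k : Int) (hi - lo) = (k : Int) := by
        rw [PySem.Int.mod_eq_emod_of_pos hL]
        exact Int.emod_eq_of_lt (by positivity) (by omega)
      rw [this]
    · apply List.map_congr_left
      intro k _
      simp only [Function.comp]
      congr 1
      rw [PySem.Int.mod_eq_emod_of_pos hL, PySem.Int.mod_eq_emod_of_pos hL]
      have : (((hi - lo).toNat + k : Nat) : Int) = (k : Int) + (hi - lo) * 1 := by
        push_cast; omega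
      rw [this, Int.add_mul_emod_self_left]

-- a cursor slice of the truncated flat list is the closed-form block
lemma pvSlice (f : Nat → Int) (N t c n : Nat) (ht : t ≤ N) (hcn : c + n ≤ t) :
    PySem.List.slice (((List.range N).map f).take t) (some (c : Int)) (some ((c : Int) + (n : Int)))
    = (List.range n).map (fun j => f (c + j)) := by
  rw [PySem.List.slice_natCast_add]
  rw [List.drop_take, List.take_take]
  have hmin : min n (t - c) = n := by omega
  rw [hmin]
  apply List.ext_getElem
  · simp; omega
  · intro i h1 h2
    simp

-- B's partition fold equals the closed-form fold
lemma pvOuterB (lo hi t : Int) (N : Nat) (ht0 : 0 ≤ t)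
    (htN : t.toNat ≤ N) :
    ∀ (nsf : List Int) (c : Nat) (acc : List (List Int)),
    ((c : Int) + (nsf.map (fun ns => max ns 0)).sum ≤ t) →
    (nsf.foldl
      (fun (st : List (List Int) × Int) ns =>
        (st.1 ++ [PySem.List.slice
            (PySem.List.slice ((List.range N).map
              (fun (k : Nat) => lo + PySem.Int.mod (k : Int) (hi - lo))) none (some t))
            (some st.2) (some (st.2 + max ns 0))], st.2 + max ns 0))
      (acc, (c : Int))).1
    = (nsf.foldl
        (fun (st : List (List Int) × Int) ns =>
          (st.1 ++ [(List.range ns.toNat).map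
              (fun (j : Nat) => lo + PySem.Int.mod (st.2 + (j : Int)) (hi - lo))],
           st.2 + (ns.toNat : Int)))
        (acc, (c : Int))).1 := by
  intro nsf
  induction nsf with
  | nil => intro c acc _; simp
  | cons ns rest ih =>
    intro c acc hsum
    simp only [List.map_cons, List.sum_cons] at hsum
    have hrest_nonneg : 0 ≤ (rest.map (fun ns => max ns 0)).sum :=
      List.sum_nonneg (by intro x hx; simp only [List.mem_map] at hx
                          obtain ⟨y, _, rfl⟩ := hx; exact le_max_right _ _)
    have hmax : (max ns 0) = ((ns.toNat : Nat) : Int) := by omega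
    have hcn : c + ns.toNat ≤ t.toNat := by omega
    simp only [List.foldl_cons]
    have hslice : PySem.List.slice
        (PySem.List.slice ((List.range N).map
          (fun (k : Nat) => lo + PySem.Int.mod (k : Int) (hi - lo))) none (some t))
        (some (c : Int)) (some ((c : Int) + max ns 0))
        = (List.range ns.toNat).map
            (fun (j : Nat) => lo + PySem.Int.mod ((c : Int) + (j : Int)) (hi - lo)) := by
      rw [PySem.List.slice_to _ ht0, hmax]
      rw [pvSlice _ N t.toNat c ns.toNat htN (by omega)]
      apply List.map_congr_left
      intro j _
      norm_cast
    rw [hslice]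
    have hc' : ((c : Int) + max ns 0) = (((c + ns.toNat : Nat)) : Int) := by push_cast; omega
    rw [hc']
    have h2 := ih (c + ns.toNat)
      (acc ++ [(List.range ns.toNat).map
        (fun (j : Nat) => lo + PySem.Int.mod ((c : Int) + (j : Int)) (hi - lo))])
      (by push_cast; omega)
    rw [h2]
    push_cast
    rfl

-- sum of clamped counts is zero iff all counts are nonpositive
lemma pvSumZero (nsf : List Int) (h : (nsf.map (fun ns => max ns 0)).sum = 0) :
    ∀ x ∈ nsf, x ≤ 0 := by
  induction nsf with
  | nil => simp
  | cons ns rest ih =>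
    simp only [List.map_cons, List.sum_cons] at h
    have hrest : 0 ≤ (rest.map (fun ns => max ns 0)).sum :=
      List.sum_nonneg (by intro x hx; simp only [List.mem_map] at hx
                          obtain ⟨y, _, rfl⟩ := hx; exact le_max_right _ _)
    intro x hx
    rcases List.mem_cons.mp hx with rfl | hx'
    · have : max x 0 = 0 := by omega
      omega
    · exact ih (by omega) x hx'

-- ===== VERDICT (by name: the statement is the Claim_ definition above) =====
theorem get_segment_lengths_by_files_spec : Claim_equal_get_segment_lengths_by_files := by
  intro nsf r _ hpre
  obtain ⟨lo, hi⟩ := r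
  unfold Spec_get_segment_lengths_by_files get_segment_lengths_by_files get_segment_lengths_by_files_alt
  simp only
  set total : Int := (nsf.map (fun ns => max ns 0)).sum with htotal
  by_cases htot : total = 0
  · -- all counts nonpositive: both sides yield only empty lists
    have hnp := pvSumZero nsf htot
    rw [if_pos htot, pvA_nonpos lo hi nsf hnp [] 0]
    simp
  · -- some count positive: Pre_ forces 0 < hi - lo
    have htpos : 0 < total := by
      have : 0 ≤ total :=
        List.sum_nonneg (by intro x hx; simp only [List.mem_map] at hx
                            obtain ⟨y, _, rfl⟩ := hx; exact le_max_right _ _)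
      omega
    have hex : ∃ x ∈ nsf, 0 < x := by
      by_contra hc
      push Not at hc
      exact htot (by
        have : ∀ x ∈ nsf, x ≤ 0 := fun x hx => hc x hx
        rw [htotal]
        apply List.sum_eq_zero
        intro y hy
        simp only [List.mem_map] at hy
        obtain ⟨z, hz, rfl⟩ := hy
        have := this z hz
        omega)
    have hL : 0 < hi - lo := by
      rcases hpre with h | h
      · exact h
      · obtain ⟨x, hx, hxpos⟩ := hex
        exact absurd (h x hx) (by omega)
    rw [if_neg htot]
    have hlen : ((PySem.List.pyRange lo hi 1).length : Int) = hi - lo := by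
      rw [PySem.List.length_pyRange_one]; omega
    set reps : Int := -(PySem.Int.floordiv (-total) ((PySem.List.pyRange lo hi 1).length : Int)) with hreps
    have hceil : (reps - 1) * (hi - lo) < total ∧ total ≤ reps * (hi - lo) := by
      rw [hreps, hlen]
      exact (PySem.Int.neg_floordiv_neg_eq_iff_of_pos hL).mp rfl
    have hreps_pos : 0 < reps := by
      nlinarith [hceil.1, hceil.2]
    have htN : total.toNat ≤ reps.toNat * (hi - lo).toNat := by
      have h1 : total ≤ reps * (hi - lo) := hceil.2
      have : (reps * (hi - lo)).toNat = reps.toNat * (hi - lo).toNat :=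
        Int.toNat_mul (by omega) (by omega)
      omega
    rw [pvFlatten lo hi hL reps.toNat]
    have h0 : PySem.Int.mod 0 (hi - lo) = 0 := by
      rw [PySem.Int.mod_eq_emod_of_pos hL]; exact Int.zero_emod _
    have hA := pvOuterA lo hi hL nsf 0 []
    rw [h0] at hA
    rw [hA]
    have hB := pvOuterB lo hi total (reps.toNat * (hi - lo).toNat) (le_of_lt htpos) htN nsf 0 []
      (by rw [htotal]; push_cast; omega)
    rw [Nat.cast_zero] at hB
    exact hB.symm
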